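-- pv_equiv track=rewrite | github.com/Avery2/wordle-helper | play.py | excluded_characters_from_guess
-- ===== SOURCE A (Python) =====
-- def excluded_characters_from_guess(guess):
--     acc = ""
--     next_marked = False
--     for c in guess:
--         if not next_marked and c not in ("*", "_"):
--             acc += c
--             next_marked = False
--         next_marked = c in ("*", "_")
--     return acc
-- ===== SOURCE B (Python) =====
-- def excluded_characters_from_guess(guess):
--     excluded = set()
--     for i, c in enumerate(guess):
--         if c in ("*", "_"):
--             excluded.add(i)
--             excluded.add(i + 1)
--     return "".join(c for i, c in enumerate(guess) if i not in excluded)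
-- ===== Notes on version B (the rewrite author's own statement) =====
-- stated objective: alternative
-- what changed: Replaces A's single-pass stateful skip-next flag with two passes: first build an excluded-index set (each marker excludes its own index and the next), then filter the characters by index.
import Mathlib
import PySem

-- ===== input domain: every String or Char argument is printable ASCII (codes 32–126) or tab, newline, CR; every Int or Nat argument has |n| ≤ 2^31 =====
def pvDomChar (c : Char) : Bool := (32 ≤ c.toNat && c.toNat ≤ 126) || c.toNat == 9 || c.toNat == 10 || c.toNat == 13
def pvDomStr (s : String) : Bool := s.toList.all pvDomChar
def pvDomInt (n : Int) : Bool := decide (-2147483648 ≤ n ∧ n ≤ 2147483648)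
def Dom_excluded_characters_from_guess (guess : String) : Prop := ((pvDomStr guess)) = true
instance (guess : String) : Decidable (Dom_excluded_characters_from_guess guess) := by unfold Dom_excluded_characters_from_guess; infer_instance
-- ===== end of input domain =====

-- B replaces A's stateful skip-next flag with an excluded-index set built first, then a separate filtering pass (objective: alternative).

-- ===== PORT A =====
-- single pass, state = (acc so far, next_marked flag)
def excluded_characters_from_guess (guess : String) : String :=
  (guess.toList.foldl
    (fun (s : String × Bool) c =>
      (if !s.2 && !(c == '*' || c == '_') then s.1.push c else s.1,
       c == '*' || c == '_'))
    ("", false)).1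

-- ===== PORT B =====
-- pass 1 of Source B: for i, c in enumerate(guess): if marker, excluded.add(i); excluded.add(i+1)
def pvExcludedSet (l : List Char) : PySem.Set Int :=
  (PySem.List.enumerate l).foldl
    (fun s p => if p.2 == '*' || p.2 == '_' then PySem.Set.add (PySem.Set.add s p.1) (p.1 + 1) else s)
    PySem.Set.empty

-- pass 2 of Source B: ''.join(c for i, c in enumerate(guess) if i not in excluded)
def excluded_characters_from_guess_alt (guess : String) : String :=
  String.ofList ((PySem.List.enumerate guess.toList).filterMap
    (fun p => if !(PySem.Set.contains (pvExcludedSet guess.toList) p.1) then some p.2 else none))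

-- ===== PRECONDITION & SPEC =====
def Spec_excluded_characters_from_guess (guess : String) (out : String) : Prop := out = excluded_characters_from_guess_alt guess
instance (guess : String) (out : String) : Decidable (Spec_excluded_characters_from_guess guess out) := by unfold Spec_excluded_characters_from_guess; infer_instance

-- ===== CLAIM (what is proved, stated in full; the proofs are below) =====
def Claim_equal_excluded_characters_from_guess : Prop := ∀ (guess : String), Dom_excluded_characters_from_guess guess → Spec_excluded_characters_from_guess guess (excluded_characters_from_guess guess)

-- ===== LEMMAS AND PROOFS =====

-- marker test, shared reference notion
def pvM (c : Char) : Bool := c == '*' || c == '_'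

-- reference recursion: the characters A keeps, with the skip flag explicit
def pvF (b : Bool) : List Char → List Char
  | [] => []
  | c :: cs => (if !b && !pvM c then [c] else []) ++ pvF (pvM c) cs

-- push then append = append with cons
theorem pvPush (acc : String) (c : Char) (l : List Char) :
    acc.push c ++ String.ofList l = acc ++ String.ofList (c :: l) := by
  apply String.toList_injective; simp

-- A's fold equals the reference
theorem pvA_fold (l : List Char) (acc : String) (b : Bool) :
    (l.foldl (fun (s : String × Bool) c =>
      (if !s.2 && !(c == '*' || c == '_') then s.1.push c else s.1,
       c == '*' || c == '_')) (acc, b)).1 = acc ++ String.ofList (pvF b l) := by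
  induction l generalizing acc b with
  | nil => simp [pvF]
  | cons c cs ih =>
    simp only [List.foldl_cons, pvF, pvM]
    rw [ih]
    by_cases h : (!b && !(c == '*' || c == '_')) = true
    · rw [if_pos h, if_pos h, pvPush]; simp
    · rw [if_neg h, if_neg h]; simp

-- membership in B's excluded-set fold
theorem pvEx_mem (es : List (Int × Char)) (s : PySem.Set Int) (i : Int) :
    i ∈ es.foldl (fun s p => if p.2 == '*' || p.2 == '_' then PySem.Set.add (PySem.Set.add s p.1) (p.1 + 1) else s) s ↔
      i ∈ s ∨ ∃ p ∈ es, pvM p.2 = true ∧ (i = p.1 ∨ i = p.1 + 1) := by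
  induction es generalizing s with
  | nil => simp
  | cons p ps ih =>
    simp only [List.foldl_cons]
    rw [ih]
    by_cases h : (p.2 == '*' || p.2 == '_') = true
    · have hm : pvM p.2 = true := by simpa [pvM] using h
      simp only [if_pos h, PySem.Set.mem_add, List.mem_cons]
      constructor
      · rintro (((hs | he) | he) | hx)
        · exact Or.inl hs
        · exact Or.inr ⟨p, Or.inl rfl, hm, Or.inl he⟩
        · exact Or.inr ⟨p, Or.inl rfl, hm, Or.inr he⟩
        · rcases hx with ⟨q, hq, hmq, hie⟩
          exact Or.inr ⟨q, Or.inr hq, hmq, hie⟩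
      · rintro (hs | ⟨q, (rfl | hq), hmq, hie⟩)
        · exact Or.inl (Or.inl (Or.inl hs))
        · rcases hie with he | he
          · exact Or.inl (Or.inl (Or.inr he))
          · exact Or.inl (Or.inr he)
        · exact Or.inr ⟨q, hq, hmq, hie⟩
    · have hm : pvM p.2 = false := by simpa [pvM] using h
      simp only [if_neg h, List.mem_cons]
      constructor
      · rintro (hs | ⟨q, hq, hmq, hie⟩)
        · exact Or.inl hs
        · exact Or.inr ⟨q, Or.inr hq, hmq, hie⟩
      · rintro (hs | ⟨q, (rfl | hq), hmq, hie⟩)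
        · exact Or.inl hs
        · simp [hm] at hmq
        · exact Or.inr ⟨q, hq, hmq, hie⟩

-- the filtering pass equals the reference, given a pointwise description of the membership test
theorem pvB_filter (P : Int → Bool) (l : List Char) (s : Int) (prev : Bool)
    (h : ∀ k : Nat, k < l.length →
      P (s + k) = (pvM (l.getD k ' ') || (if k = 0 then prev else pvM (l.getD (k-1) ' ')))) :
    (PySem.List.enumerate l s).filterMap (fun p => if !(P p.1) then some p.2 else none)
      = pvF prev l := by
  induction l generalizing s prev with
  | nil => simp [pvF, PySem.List.enumerate_nil]
  | cons c cs ih =>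
    have h0 : P s = (pvM c || prev) := by simpa using h 0 (by simp)
    have htail : ∀ k : Nat, k < cs.length →
        P (s + 1 + k) = (pvM (cs.getD k ' ') || (if k = 0 then pvM c else pvM (cs.getD (k-1) ' '))) := by
      intro k hk
      have hh := h (k+1) (by simp; omega)
      have hcast : s + ((k+1 : Nat) : Int) = s + 1 + (k : Int) := by push_cast; ring
      rw [hcast] at hh
      rw [hh]
      cases k with
      | zero => simp
      | succ m => simp
    rw [PySem.List.enumerate_cons, List.filterMap_cons, ih (s + 1) (pvM c) htail]
    simp only [h0]
    cases hpm : pvM c <;> cases prev <;> simp [pvF, hpm]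

-- the membership test of pvExcludedSet, pointwise
theorem pvP_char (l : List Char) (k : Nat) (hk : k < l.length) :
    PySem.Set.contains (pvExcludedSet l) ((0 : Int) + k) =
      (pvM (l.getD k ' ') || (if k = 0 then false else pvM (l.getD (k-1) ' '))) := by
  rw [Bool.eq_iff_iff, PySem.Set.contains_iff]
  unfold pvExcludedSet
  rw [pvEx_mem]
  have hgd : l.getD k ' ' = l[k]'hk := List.getD_eq_getElem l ' ' hk
  constructor
  · rintro (h0 | ⟨p, hp, hm, hie⟩)
    · simp [PySem.Set.empty] at h0
    · rw [PySem.List.mem_enumerate_iff] at hp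
      obtain ⟨j, hj, rfl⟩ := hp
      simp only at hie hm
      rcases hie with he | he
      · have hkj : k = j := by omega
        subst hkj
        rw [Bool.or_eq_true]
        left; rw [hgd]; exact hm
      · have hkj : k = j + 1 := by omega
        have hne : ¬ (k = 0) := by omega
        rw [if_neg hne]
        have hgd2 : l.getD (k-1) ' ' = l[j]'hj := by
          have e : k - 1 = j := by omega
          rw [e]; exact List.getD_eq_getElem l ' ' hj
        rw [Bool.or_eq_true]
        right; rw [hgd2]; exact hm
  · intro hr
    right
    rcases Nat.eq_zero_or_pos k with rfl | hpos
    · rw [if_pos rfl] at hr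
      simp only [Bool.or_false] at hr
      refine ⟨((0:Int) + (0:Nat), l[0]'hk), ?_, ?_, Or.inl rfl⟩
      · rw [PySem.List.mem_enumerate_iff]; exact ⟨0, hk, rfl⟩
      · rw [← hgd]; exact hr
    · rw [if_neg (by omega)] at hr
      rcases Bool.or_eq_true_iff.mp hr with hm | hm
      · refine ⟨((0:Int) + k, l[k]'hk), ?_, ?_, Or.inl rfl⟩
        · rw [PySem.List.mem_enumerate_iff]; exact ⟨k, hk, rfl⟩
        · rw [← hgd]; exact hm
      · refine ⟨((0:Int) + (k-1 : Nat), l[k-1]'(by omega)), ?_, ?_, Or.inr (by push_cast; omega)⟩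
        · rw [PySem.List.mem_enumerate_iff]; exact ⟨k-1, by omega, rfl⟩
        · rw [← List.getD_eq_getElem l ' ' (show k-1 < l.length by omega)]; exact hm

-- ===== VERDICT (by name: the statement is the Claim_ definition above) =====
theorem excluded_characters_from_guess_spec : Claim_equal_excluded_characters_from_guess := by
  intro guess _
  unfold Spec_excluded_characters_from_guess excluded_characters_from_guess excluded_characters_from_guess_alt
  rw [pvA_fold]
  rw [pvB_filter (fun i => PySem.Set.contains (pvExcludedSet guess.toList) i) guess.toList 0 false
      (fun k hk => pvP_char guess.toList k hk)]
  simp
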